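-- pv_equiv track=rewrite | github.com/the-ton-tech/x402 | python/x402/mechanisms/tvm/streaming.py | _iter_sse_payloads
-- ===== SOURCE A (Python) =====
-- from collections.abc import Callable, Iterable, Iterator
--
-- def _iter_sse_payloads(lines: Iterable[str]) -> Iterator[str]:
--     """Yield SSE event payloads from an iterable of text lines."""
--     data_lines: list[str] = []
--
--     for line in lines:
--         if line == "":
--             if data_lines:
--                 yield "\n".join(data_lines)
--                 data_lines = []
--             continue
--         if line.startswith(":"):
--             continue
--         if line.startswith("data:"):
--             data_lines.append(line[5:].lstrip())
--             continue
--         if line.startswith(("event:", "id:", "retry:")):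
--             continue
--         data_lines.append(line)
--
--     if data_lines:
--         yield "\n".join(data_lines)
-- ===== SOURCE B (Python) =====
-- def _blocks(lines):
--     block = []
--     for line in lines:
--         if line == "":
--             yield block
--             block = []
--         else:
--             block.append(line)
--     yield block
--
--
-- def _payload_parts(block):
--     return [line[5:].lstrip() if line.startswith("data:") else line
--             for line in block
--             if not (line.startswith(":")
--                     or line.startswith(("event:", "id:", "retry:")))]
--
--
-- def _iter_sse_payloads(lines):
--     """Yield SSE event payloads from an iterable of text lines."""
--     for block in _blocks(lines):
--         parts = _payload_parts(block)
--         if parts: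
--             yield "\n".join(parts)
-- ===== Notes on version B (the rewrite author's own statement) =====
-- stated objective: alternative
-- what changed: B first splits the line stream into blocks at empty lines with a generator, then derives each payload from a whole block by a single filter+map comprehension, instead of A's one interleaved loop mutating a data_lines accumulator with continue-chained branches.
import Mathlib
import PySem

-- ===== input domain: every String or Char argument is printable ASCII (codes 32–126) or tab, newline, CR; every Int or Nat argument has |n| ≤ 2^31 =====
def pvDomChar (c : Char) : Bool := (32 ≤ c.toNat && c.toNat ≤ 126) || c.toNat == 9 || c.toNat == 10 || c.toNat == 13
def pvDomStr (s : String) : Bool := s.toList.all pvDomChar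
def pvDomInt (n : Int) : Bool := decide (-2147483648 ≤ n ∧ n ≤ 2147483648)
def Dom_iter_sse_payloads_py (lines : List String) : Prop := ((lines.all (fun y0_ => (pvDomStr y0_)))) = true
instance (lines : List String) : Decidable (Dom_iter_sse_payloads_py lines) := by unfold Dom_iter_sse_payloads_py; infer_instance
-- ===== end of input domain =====

-- B restructures A's single accumulator loop into split-into-blocks-at-empty-lines followed by a per-block filter+map; same cost, clearer decomposition.

-- ===== PORT A =====
-- one step of A's for-loop over (yielded-so-far, data_lines)
def pvStepA (st : List String × List String) (line : String) : List String × List String :=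
  if line = "" then
    (if st.2 ≠ [] then (st.1 ++ [PySem.Str.join "\n" st.2], ([] : List String)) else st)
  else if PySem.Str.startswith line ":" then st
  else if PySem.Str.startswith line "data:" then
    (st.1, st.2 ++ [PySem.Str.lstrip (PySem.Str.slice line (some 5) none)])
  else if PySem.Str.startswith line "event:" || PySem.Str.startswith line "id:" ||
          PySem.Str.startswith line "retry:" then st
  else (st.1, st.2 ++ [line])

def iter_sse_payloads_py (lines : List String) : List String :=
  let st := lines.foldl pvStepA ([], [])
  if st.2 ≠ [] then st.1 ++ [PySem.Str.join "\n" st.2] else st.1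

-- ===== PORT B =====
-- B's _blocks generator: split at empty lines (state = (blocks yielded, current block))
def pvStepBlk (st : List (List String) × List String) (l : String) :
    List (List String) × List String :=
  if l = "" then (st.1 ++ [st.2], []) else (st.1, st.2 ++ [l])

def pvBlocks (lines : List String) : List (List String) :=
  let st := lines.foldl pvStepBlk ([], [])
  st.1 ++ [st.2]

-- B's comprehension filter and map
def pvKeep (l : String) : Bool :=
  !(PySem.Str.startswith l ":" || PySem.Str.startswith l "event:" ||
    PySem.Str.startswith l "id:" || PySem.Str.startswith l "retry:")

def pvMapLine (l : String) : String :=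
  if PySem.Str.startswith l "data:" then PySem.Str.lstrip (PySem.Str.slice l (some 5) none)
  else l

def pvParts (b : List String) : List String := (b.filter pvKeep).map pvMapLine

def pvEmit (acc : List String) (b : List String) : List String :=
  let parts := pvParts b
  if parts ≠ [] then acc ++ [PySem.Str.join "\n" parts] else acc

def iter_sse_payloads_py_alt (lines : List String) : List String :=
  (pvBlocks lines).foldl pvEmit []

-- ===== PRECONDITION & SPEC =====
def Spec_iter_sse_payloads_py (lines : List String) (out : List String) : Prop := out = iter_sse_payloads_py_alt lines
instance (lines : List String) (out : List String) : Decidable (Spec_iter_sse_payloads_py lines out) := by unfold Spec_iter_sse_payloads_py; infer_instance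

-- ===== CLAIM (what is proved, stated in full; the proofs are below) =====
def Claim_equal_iter_sse_payloads_py : Prop := ∀ (lines : List String), Dom_iter_sse_payloads_py lines → Spec_iter_sse_payloads_py lines (iter_sse_payloads_py lines)

-- ===== LEMMAS AND PROOFS =====

-- two strings with different first characters are never both prefixes of the same list
theorem pv_pref_head {a b : Char} {p q L : List Char}
    (h1 : (a :: p) <+: L) (h2 : (b :: q) <+: L) : a = b := by
  rcases h1 with ⟨t1, rfl⟩
  rcases h2 with ⟨t2, h⟩
  simpa using congrArg (List.head? ·) h.symm

theorem pv_data_keep (l : String) (h : PySem.Str.startswith l "data:" = true) :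
    pvKeep l = true := by
  have hd : ('d' :: ['a','t','a',':']) <+: l.toList :=
    (PySem.Chars.startswith_iff _ _).mp (by simpa using h)
  have key : ∀ (c : Char) (p : List Char),
      PySem.Chars.startswith l.toList (c :: p) = true → c = 'd' := by
    intro c p hx
    exact pv_pref_head ((PySem.Chars.startswith_iff _ _).mp hx) hd
  have h1 : PySem.Chars.startswith l.toList [':'] = false := by
    cases hx : PySem.Chars.startswith l.toList [':'] with
    | true => exact absurd (key _ _ hx) (by decide)
    | false => rfl
  have h2 : PySem.Chars.startswith l.toList ['e','v','e','n','t',':'] = false := by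
    cases hx : PySem.Chars.startswith l.toList ['e','v','e','n','t',':'] with
    | true => exact absurd (key _ _ hx) (by decide)
    | false => rfl
  have h3 : PySem.Chars.startswith l.toList ['i','d',':'] = false := by
    cases hx : PySem.Chars.startswith l.toList ['i','d',':'] with
    | true => exact absurd (key _ _ hx) (by decide)
    | false => rfl
  have h4 : PySem.Chars.startswith l.toList ['r','e','t','r','y',':'] = false := by
    cases hx : PySem.Chars.startswith l.toList ['r','e','t','r','y',':'] with
    | true => exact absurd (key _ _ hx) (by decide)
    | false => rfl
  simp [pvKeep, h1, h2, h3, h4]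

theorem pv_stepA_ne (out dl : List String) (l : String) (hl : l ≠ "") :
    pvStepA (out, dl) l = (out, dl ++ if pvKeep l then [pvMapLine l] else []) := by
  unfold pvStepA pvKeep pvMapLine
  by_cases hc : PySem.Str.startswith l ":" = true
  · simp at hc; simp [hl, hc]
  by_cases hdt : PySem.Str.startswith l "data:" = true
  · have hk := pv_data_keep l hdt
    unfold pvKeep at hk
    simp only [Bool.not_eq_true', Bool.or_eq_false_iff] at hk
    have hk1 := hk.1.1.2; have hk2 := hk.1.2; have hk3 := hk.2
    simp at hc hdt hk1 hk2 hk3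
    simp [hl, hc, hdt, hk1, hk2, hk3]
  by_cases he : (PySem.Str.startswith l "event:" || PySem.Str.startswith l "id:" ||
      PySem.Str.startswith l "retry:") = true
  · simp only [Bool.or_eq_true] at he
    simp at hc hdt
    rcases he with (he | he) | he <;> simp at he <;> simp [hl, hc, hdt, he]
  · simp only [Bool.or_eq_true, not_or, Bool.not_eq_true] at he
    have he1 := he.1.1; have he2 := he.1.2; have he3 := he.2
    simp at hc hdt he1 he2 he3
    simp [hl, hc, hdt, he1, he2, he3]

theorem pv_parts_append (b : List String) (l : String) :
    pvParts (b ++ [l]) = pvParts b ++ if pvKeep l then [pvMapLine l] else [] := by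
  unfold pvParts
  by_cases h : pvKeep l = true <;> simp [h]

-- main invariant: A's loop from (out, parts cur) matches B's block fold from (bs, cur)
theorem pv_main (lines : List String) : ∀ (bs : List (List String)) (cur out : List String),
    out = bs.foldl pvEmit [] →
    (let st := lines.foldl pvStepA (out, pvParts cur)
     if st.2 ≠ [] then st.1 ++ [PySem.Str.join "\n" st.2] else st.1) =
    (let st := lines.foldl pvStepBlk (bs, cur)
     (st.1 ++ [st.2]).foldl pvEmit []) := by
  induction lines with
  | nil =>
    intro bs cur out hout
    simp only [List.foldl_nil, List.foldl_append, ← hout]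
    by_cases h : pvParts cur = [] <;> simp [pvEmit, h]
  | cons l ls ih =>
    intro bs cur out hout
    by_cases hl : l = ""
    · subst hl
      have hstep : pvStepA (out, pvParts cur) "" = (pvEmit out cur, pvParts []) := by
        unfold pvStepA pvEmit pvParts
        by_cases h : (cur.filter pvKeep).map pvMapLine = [] <;> simp [h]
      have hstepB : pvStepBlk (bs, cur) "" = (bs ++ [cur], []) := by simp [pvStepBlk]
      simp only [List.foldl_cons, hstep, hstepB]
      exact ih (bs ++ [cur]) [] (pvEmit out cur) (by simp [hout, List.foldl_append])
    · have hstep := pv_stepA_ne out (pvParts cur) l hl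
      have hstepB : pvStepBlk (bs, cur) l = (bs, cur ++ [l]) := by simp [pvStepBlk, hl]
      simp only [List.foldl_cons, hstep, hstepB, ← pv_parts_append]
      exact ih bs (cur ++ [l]) out hout

-- ===== VERDICT (by name: the statement is the Claim_ definition above) =====
theorem iter_sse_payloads_py_spec : Claim_equal_iter_sse_payloads_py := by
  intro lines _
  unfold Spec_iter_sse_payloads_py iter_sse_payloads_py iter_sse_payloads_py_alt pvBlocks
  have := pv_main lines [] [] [] rfl
  simpa [pvParts] using this
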